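-- pv_equiv track=rewrite | github.com/sampanc22/cse584project | evaluation/evaluation_common.py | update_gold_answers_after_edit
-- ===== SOURCE A (Python) =====
-- from typing import Any, Dict, List, Optional, Tuple
--
-- def update_gold_answers_after_edit(
--     gold_answers: List[str],
--     original_answer: str,
--     new_answer: str,
-- ) -> List[str]:
--     """
--     Update only the gold answers that are affected by the synthetic edit.
--
--     Rules:
--     - if a gold answer exactly equals the edited answer, replace it
--     - if the edited answer appears as a substring inside a longer gold answer,
--       replace that substring
--     - otherwise keep the gold answer unchanged
--     - deduplicate results while preserving order
--     """
--     updated = []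
--
--     for ans in gold_answers:
--         new_gold = ans
--
--         if ans == original_answer:
--             new_gold = new_answer
--         elif original_answer in ans:
--             new_gold = ans.replace(original_answer, new_answer)
--         else:
--             new_gold = ans
--
--         updated.append(new_gold)
--
--     # dedupe while preserving order
--     deduped = []
--     seen = set()
--     for ans in updated:
--         if ans not in seen:
--             deduped.append(ans)
--             seen.add(ans)
--
--     return deduped
-- ===== SOURCE B (Python) =====
-- def update_gold_answers_after_edit(gold_answers, original_answer, new_answer):
--     # Back-to-front: walk the list in reverse, prepend each replaced answer and
--     # drop its duplicates from the result built so far (no seen-set, dedup by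
--     # filtering). str.replace subsumes A's exact-equal / substring / absent branches.
--     result = []
--     for ans in reversed(gold_answers):
--         g = ans.replace(original_answer, new_answer)
--         result = [g] + [y for y in result if y != g]
--     return result
-- ===== Notes on version B (the rewrite author's own statement) =====
-- stated objective: alternative
-- what changed: B traverses the list back-to-front, prepending each unconditionally replaced answer and deduplicating by filtering its duplicates out of the accumulated result (no branch ladder, no seen-set, no separate dedup pass), instead of A's forward transform pass followed by a seen-set dedup pass; B is O(n*k) in list length n and output size k where A is linear.
import Mathlib
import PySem

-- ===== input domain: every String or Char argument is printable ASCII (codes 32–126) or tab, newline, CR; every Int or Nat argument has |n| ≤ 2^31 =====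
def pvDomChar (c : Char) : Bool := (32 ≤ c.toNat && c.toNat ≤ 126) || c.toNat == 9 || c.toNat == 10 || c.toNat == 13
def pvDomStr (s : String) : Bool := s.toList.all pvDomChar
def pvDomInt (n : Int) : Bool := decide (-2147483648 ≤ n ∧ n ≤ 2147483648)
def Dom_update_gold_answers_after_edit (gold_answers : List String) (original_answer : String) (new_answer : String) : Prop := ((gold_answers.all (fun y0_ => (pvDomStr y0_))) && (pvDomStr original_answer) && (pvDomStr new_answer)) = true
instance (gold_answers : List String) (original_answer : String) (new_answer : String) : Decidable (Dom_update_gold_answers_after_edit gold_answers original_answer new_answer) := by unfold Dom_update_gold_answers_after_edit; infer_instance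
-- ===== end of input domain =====

-- B walks the list back-to-front, prepending each unconditionally replaced answer
-- and deduplicating by filtering the accumulated result (objective: alternative).

-- ===== PORT A =====
def update_gold_answers_after_edit (gold_answers : List String) (original_answer : String) (new_answer : String) : List String :=
  let updated := gold_answers.foldl (fun acc ans =>
    let new_gold :=
      if ans == original_answer then new_answer
      else if PySem.Str.isIn original_answer ans then PySem.Str.replace ans original_answer new_answer
      else ans
    acc ++ [new_gold]) []
  let st := updated.foldl (fun (p : List String × PySem.Set String) ans =>
      if PySem.Set.contains p.2 ans then p else (p.1 ++ [ans], PySem.Set.add p.2 ans))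
    ([], PySem.Set.empty)
  st.1

-- ===== PORT B =====
def update_gold_answers_after_edit_alt (gold_answers : List String) (original_answer : String) (new_answer : String) : List String :=
  gold_answers.reverse.foldl (fun result ans =>
    let g := PySem.Str.replace ans original_answer new_answer
    g :: result.filter (fun y => !(y == g))) []

-- ===== PRECONDITION & SPEC =====
def Spec_update_gold_answers_after_edit (gold_answers : List String) (original_answer : String) (new_answer : String) (out : List String) : Prop := out = update_gold_answers_after_edit_alt gold_answers original_answer new_answer
instance (gold_answers : List String) (original_answer : String) (new_answer : String) (out : List String) : Decidable (Spec_update_gold_answers_after_edit gold_answers original_answer new_answer out) := by unfold Spec_update_gold_answers_after_edit; infer_instance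

-- ===== CLAIM (what is proved, stated in full; the proofs are below) =====
def Claim_equal_update_gold_answers_after_edit : Prop := ∀ (gold_answers : List String) (original_answer : String) (new_answer : String), Dom_update_gold_answers_after_edit gold_answers original_answer new_answer → Spec_update_gold_answers_after_edit gold_answers original_answer new_answer (update_gold_answers_after_edit gold_answers original_answer new_answer)

-- ===== LEMMAS AND PROOFS =====

-- replace.go on an exhausted list returns the accumulator
theorem go_nil (old new acc : List Char) (fuel : Nat) :
    PySem.Chars.replace.go old new fuel [] acc = acc.reverse := by
  cases fuel <;> simp [PySem.Chars.replace.go]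

-- replace s s n = n (Python: s.replace(s, n) == n)
theorem chars_replace_self (s n : List Char) : PySem.Chars.replace s s n = n := by
  cases s with
  | nil => simp [PySem.Chars.replace]
  | cons c t =>
    have hpre : (c :: t).isPrefixOf (c :: t) = true := by
      rw [List.isPrefixOf_iff_prefix]
    simp only [PySem.Chars.replace, List.isEmpty_cons, Bool.false_eq_true, if_false,
      List.length_cons, PySem.Chars.replace.go, hpre, if_true]
    rw [show t.length + 1 = (c :: t).length from rfl, List.drop_length, go_nil]
    simp

-- replace.go leaves a list with no occurrence of old unchanged
theorem go_no_occ (old new : List Char) (fuel : Nat) (l acc : List Char)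
    (h : ¬ old <:+: l) :
    PySem.Chars.replace.go old new fuel l acc = acc.reverse ++ l := by
  induction fuel generalizing l acc with
  | zero => simp [PySem.Chars.replace.go]
  | succ fuel ih =>
    cases l with
    | nil => simp [PySem.Chars.replace.go]
    | cons c t =>
      have hpre : old.isPrefixOf (c :: t) = false := by
        exact Bool.eq_false_iff.mpr
          (fun hb => h (List.isPrefixOf_iff_prefix.mp hb).isInfix)
      simp only [PySem.Chars.replace.go, hpre, Bool.false_eq_true, if_false]
      rw [ih t (c :: acc) (fun hi => h (List.infix_cons hi))]
      simp

-- if old does not occur in s, replace leaves s unchanged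
theorem chars_replace_of_not_infix (s old n : List Char) (h : ¬ old <:+: s) :
    PySem.Chars.replace s old n = s := by
  have hne : old.isEmpty = false := by
    cases old with
    | nil => exact absurd (List.nil_infix (l := s)) h
    | cons _ _ => rfl
  simp only [PySem.Chars.replace, hne, Bool.false_eq_true, if_false]
  simpa using go_no_occ old n s.length s [] h

-- A's per-element branch ladder equals the unconditional replace
theorem branch_eq_replace (ans o n : String) :
    (if ans == o then n
     else if PySem.Str.isIn o ans then PySem.Str.replace ans o n
     else ans) = PySem.Str.replace ans o n := by
  by_cases h1 : (ans == o) = true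
  · have : ans = o := eq_of_beq h1
    subst this
    simp only [h1, if_true]
    unfold PySem.Str.replace
    rw [chars_replace_self]
    simp
  · rw [if_neg h1]
    by_cases h2 : PySem.Str.isIn o ans = true
    · rw [if_pos h2]
    · rw [if_neg h2]
      have hni : ¬ o.toList <:+: ans.toList := by
        rw [← PySem.Chars.isIn_eq_false_iff]
        rw [← PySem.Str.isIn_eq]
        exact Bool.eq_false_iff.mpr h2
      unfold PySem.Str.replace
      rw [chars_replace_of_not_infix _ _ _ hni]
      simp

-- A's first loop builds init ++ map f over the list
theorem foldl_append_map {α β : Type} (f : α → β) (xs : List α) (init : List β) :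
    xs.foldl (fun acc a => acc ++ [f a]) init = init ++ xs.map f := by
  induction xs generalizing init with
  | nil => simp
  | cons x t ih => simp [List.foldl, ih]

-- B's dedup-by-filter step, as a foldr step
def dedupStep (a : String) (res : List String) : List String :=
  a :: res.filter (fun y => !(y == a))

-- foldr over dedupStep commutes with filter
theorem foldr_dedupStep_filter (p : String → Bool) (zs : List String) :
    (zs.filter p).foldr dedupStep [] = (zs.foldr dedupStep []).filter p := by
  induction zs with
  | nil => rfl
  | cons b t ih =>
    by_cases hb : p b = true
    · simp only [List.filter_cons, hb, if_true, List.foldr_cons, dedupStep, ih,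
        List.filter_cons, List.filter_filter]
      congr 1
      apply List.filter_congr
      intro x _
      exact Bool.and_comm _ _
    · have hb' : p b = false := Bool.eq_false_iff.mpr hb
      simp only [List.filter_cons, hb', Bool.false_eq_true, if_false, List.foldr_cons,
        dedupStep, ih, List.filter_filter]
      apply List.filter_congr
      intro x _
      by_cases hx : (x == b) = true
      · have : x = b := eq_of_beq hx
        subst this
        simp [hb']
      · simp [Bool.eq_false_iff.mpr hx]

-- A's seen-set dedup fold equals B's foldr dedup on the not-yet-seen elements
theorem dedup_fold_eq (ys : List String) (acc : List String) (seen : PySem.Set String) :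
    (ys.foldl (fun (p : List String × PySem.Set String) ans =>
        if PySem.Set.contains p.2 ans then p else (p.1 ++ [ans], PySem.Set.add p.2 ans))
      (acc, seen)).1
    = acc ++ (ys.filter (fun x => !(PySem.Set.contains seen x))).foldr dedupStep [] := by
  induction ys generalizing acc seen with
  | nil => simp
  | cons a t ih =>
    by_cases ha : PySem.Set.contains seen a = true
    · simp only [List.foldl_cons, ha, if_true]
      rw [ih]
      have hm : a ∈ seen := by simpa [PySem.Set.contains] using ha
      simp [hm]
    · have ha' : PySem.Set.contains seen a = false := Bool.eq_false_iff.mpr ha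
      have hmem : a ∉ seen := by simpa [PySem.Set.contains] using ha'
      have hadd : PySem.Set.add seen a = seen ++ [a] := by
        simp [PySem.Set.add, PySem.Set.contains, hmem]
      simp only [List.foldl_cons, ha', Bool.false_eq_true, if_false]
      rw [ih]
      have hfil : t.filter (fun x => !(PySem.Set.contains (PySem.Set.add seen a) x))
          = (t.filter (fun x => !(PySem.Set.contains seen x))).filter (fun x => !(x == a)) := by
        rw [hadd, List.filter_filter]
        apply List.filter_congr
        intro x _
        by_cases hx : x = a
        · subst hx
          simp [PySem.Set.contains]
        · simp [PySem.Set.contains, hx, beq_eq_false_iff_ne]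
      rw [hfil, foldr_dedupStep_filter]
      simp [hmem, dedupStep]

theorem update_gold_answers_after_edit_eq (gold_answers : List String) (o n : String) :
    update_gold_answers_after_edit gold_answers o n = update_gold_answers_after_edit_alt gold_answers o n := by
  unfold update_gold_answers_after_edit update_gold_answers_after_edit_alt
  rw [foldl_append_map (fun ans =>
      if ans == o then n
      else if PySem.Str.isIn o ans then PySem.Str.replace ans o n
      else ans) gold_answers []]
  have hmap : gold_answers.map (fun ans =>
      if ans == o then n
      else if PySem.Str.isIn o ans then PySem.Str.replace ans o n
      else ans) = gold_answers.map (fun ans => PySem.Str.replace ans o n) :=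
    List.map_congr_left (fun a _ => branch_eq_replace a o n)
  simp only []
  rw [List.nil_append, hmap, dedup_fold_eq]
  have hB : ∀ (l : List String) (init : List String),
      l.reverse.foldl (fun result ans =>
        (PySem.Str.replace ans o n) :: result.filter (fun y => !(y == PySem.Str.replace ans o n))) init
      = l.foldr (fun ans result => dedupStep (PySem.Str.replace ans o n) result) init := by
    intro l init
    rw [List.foldl_reverse]
    rfl
  rw [hB]
  have hempty : (gold_answers.map (fun ans => PySem.Str.replace ans o n)).filter
      (fun x => !(PySem.Set.contains PySem.Set.empty x))
      = gold_answers.map (fun ans => PySem.Str.replace ans o n) := by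
    apply List.filter_eq_self.mpr
    intro x _
    simp [PySem.Set.contains, PySem.Set.empty]
  rw [hempty, List.foldr_map]
  rfl

-- ===== VERDICT (by name: the statement is the Claim_ definition above) =====
theorem update_gold_answers_after_edit_spec : Claim_equal_update_gold_answers_after_edit := by
  intro g o n _
  exact update_gold_answers_after_edit_eq g o n
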